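-- pv_equiv track=rewrite | github.com/erelsgl/fairpy | items/partitions.py | bidirectional_balanced_partition
-- ===== SOURCE A (Python) =====
-- from typing import List
--
-- def bidirectional_balanced_partition(num_of_parts:int, item_sizes:List[int])->List[List[int]]:
--     """
--     Partition the numbers using "bidirectional balanced partition" (ABCCBA order)
--     >>> bidirectional_balanced_partition(2, [1,2,3,4,5,6])
--     [[6, 3, 2], [5, 4, 1]]
--     >>> bidirectional_balanced_partition(3, [1,2,3,4,5,6])
--     [[6, 1], [5, 2], [4, 3]]
--     """
--     values = sorted(item_sizes, reverse=True)
--     parts = [ [] for i in range(num_of_parts) ]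
--     current_bundle = 0
--     current_direction = +1
--     for v in values:
--         parts[current_bundle].append(v)
--         current_bundle += current_direction
--         if current_bundle > num_of_parts-1:
--             current_bundle = num_of_parts-1
--             current_direction = -1
--         if current_bundle < 0:
--             current_bundle = 0
--             current_direction = +1
--     return parts
-- ===== SOURCE B (Python) =====
-- def bidirectional_balanced_partition(num_of_parts, item_sizes):
--     # Recursive "deal a row forward, then flip": partition the rest, reverse it,
--     # and prepend the next row of the k largest values.
--     def distribute(vals):
--         if not vals:
--             return [[] for _ in range(num_of_parts)]
--         row, rest = vals[:num_of_parts], vals[num_of_parts:]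
--         tails = distribute(rest)
--         return [([row[j]] if j < len(row) else []) + tails[num_of_parts - 1 - j]
--                 for j in range(num_of_parts)]
--     return distribute(sorted(item_sizes, reverse=True))
-- ===== Notes on version B (the rewrite author's own statement) =====
-- stated objective: alternative
-- what changed: Replaces A's iterative single pass with a mutable bundle/direction snake state machine by a recursive decomposition: peel off rows of num_of_parts largest values, deal each row forward, and reverse the recursively-built partition of the rest at every level (deal-then-flip), with no direction state at all.
import Mathlib
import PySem

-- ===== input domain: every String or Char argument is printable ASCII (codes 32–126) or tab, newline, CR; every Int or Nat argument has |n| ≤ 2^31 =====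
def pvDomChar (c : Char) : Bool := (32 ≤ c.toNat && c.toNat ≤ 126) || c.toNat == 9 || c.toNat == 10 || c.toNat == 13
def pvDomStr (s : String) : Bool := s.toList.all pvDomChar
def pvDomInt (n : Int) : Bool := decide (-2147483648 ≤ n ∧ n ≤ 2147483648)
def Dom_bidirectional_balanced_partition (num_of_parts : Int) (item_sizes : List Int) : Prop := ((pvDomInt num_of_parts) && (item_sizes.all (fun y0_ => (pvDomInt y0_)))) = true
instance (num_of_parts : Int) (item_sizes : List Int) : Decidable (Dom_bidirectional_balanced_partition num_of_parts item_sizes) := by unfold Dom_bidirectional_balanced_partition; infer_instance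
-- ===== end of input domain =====

-- B replaces A's iterative snake state machine (mutable bundle index + direction) by a
-- recursive deal-then-flip decomposition: peel off a row of num_of_parts values, deal it
-- forward, and reverse the recursively built partition of the rest (objective: alternative).

-- ===== PORT A =====
-- parts[b].append(v): Python indexing (IndexError = none, excluded by Pre_); on the
-- admitted inputs the index is always in range, so the 'none => parts' arm is unreachable.
def pyAppendAt (parts : List (List Int)) (b : Int) (v : Int) : List (List Int) :=
  match PySem.List.pyGet? parts b with
  | some row => PySem.List.pySetD parts b (row ++ [v])
  | none => parts

-- one iteration of A's for-loop: append, step the bundle, clamp and flip direction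
def stepA (k : Int) (st : List (List Int) × Int × Int) (v : Int) : List (List Int) × Int × Int :=
  let parts := pyAppendAt st.1 st.2.1 v
  let b := st.2.1 + st.2.2
  let d := st.2.2
  let bd : Int × Int := if b > k - 1 then (k - 1, -1) else (b, d)
  let bd : Int × Int := if bd.1 < 0 then (0, 1) else bd
  (parts, bd)

def bidirectional_balanced_partition (num_of_parts : Int) (item_sizes : List Int) : List (List Int) :=
  let values := PySem.List.sorted item_sizes (fun x => x) true
  let parts : List (List Int) := (PySem.List.pyRange 0 num_of_parts 1).map (fun _ => [])
  (values.foldl (stepA num_of_parts) (parts, 0, 1)).1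

-- ===== PORT B =====
-- B's inner recursive distribute(vals); recursion on a fuel bounded by the list length
-- (under Pre_ the fuel never runs out: each level consumes at least one element).
-- row[j] (guarded, in range) and tails[k-1-j] (in range) are Python indexing: .getD is
-- only the totalizing default of the unreachable IndexError arm.
def distributeB (k : Int) : Nat → List Int → List (List Int)
  | _, [] => (PySem.List.pyRange 0 k 1).map (fun _ => ([] : List Int))
  | 0, _ :: _ => []
  | fuel + 1, v :: vs =>
      let row := PySem.List.slice (v :: vs) none (some k)
      let rest := PySem.List.slice (v :: vs) (some k) none
      let tails := distributeB k fuel rest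
      (PySem.List.pyRange 0 k 1).map (fun j =>
        (if j < (row.length : Int) then [(PySem.List.pyGet? row j).getD 0] else []) ++
        (PySem.List.pyGet? tails (k - 1 - j)).getD [])

def bidirectional_balanced_partition_alt (num_of_parts : Int) (item_sizes : List Int) : List (List Int) :=
  let values := PySem.List.sorted item_sizes (fun x => x) true
  distributeB num_of_parts (values.length + 1) values

-- ===== PRECONDITION & SPEC =====
-- Pre_ excludes exactly the inputs where A raises: with num_of_parts < 1 and a nonempty
-- list, A's first parts[0].append raises IndexError (B also raises there, RecursionError).
def Pre_bidirectional_balanced_partition (num_of_parts : Int) (item_sizes : List Int) : Prop :=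
  1 ≤ num_of_parts ∨ item_sizes = []
instance (num_of_parts : Int) (item_sizes : List Int) : Decidable (Pre_bidirectional_balanced_partition num_of_parts item_sizes) := by unfold Pre_bidirectional_balanced_partition; infer_instance

def pvWitness_bidirectional_balanced_partition : Int × List Int := (3, [1, 2, 3, 4, 5, 6, 7])

def Spec_bidirectional_balanced_partition (num_of_parts : Int) (item_sizes : List Int) (out : List (List Int)) : Prop := out = bidirectional_balanced_partition_alt num_of_parts item_sizes
instance (num_of_parts : Int) (item_sizes : List Int) (out : List (List Int)) : Decidable (Spec_bidirectional_balanced_partition num_of_parts item_sizes out) := by unfold Spec_bidirectional_balanced_partition; infer_instance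

-- ===== CLAIM (what is proved, stated in full; the proofs are below) =====
def Claim_equal_bidirectional_balanced_partition : Prop := ∀ (num_of_parts : Int) (item_sizes : List Int), Dom_bidirectional_balanced_partition num_of_parts item_sizes → Pre_bidirectional_balanced_partition num_of_parts item_sizes → Spec_bidirectional_balanced_partition num_of_parts item_sizes (bidirectional_balanced_partition num_of_parts item_sizes)

-- ===== LEMMAS AND PROOFS =====

-- the triangle-wave destination of the item at position i (proof device relating both ports)
def tri (k i : Int) : Int :=
  if PySem.Int.mod i (2 * k) < k then PySem.Int.mod i (2 * k) else 2 * k - 1 - PySem.Int.mod i (2 * k)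

-- one append step driven by the position (the common shape both ports are reduced to)
def stepT (k : Int) (parts : List (List Int)) (iv : Int × Int) : List (List Int) :=
  pyAppendAt parts (tri k iv.1) iv.2

-- the sublist of vs that goes to bundle j, when vs starts at position i
def selp (k j : Int) : Int → List Int → List Int
  | _, [] => []
  | i, v :: vs => (if tri k i = j then [v] else []) ++ selp k j (i + 1) vs

lemma mod_succ_cycle (k i : Int) (hk : 1 ≤ k) :
    PySem.Int.mod (i + 1) (2 * k)
      = if PySem.Int.mod i (2 * k) = 2 * k - 1 then 0 else PySem.Int.mod i (2 * k) + 1 := by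
  have h2k : (0 : Int) < 2 * k := by omega
  rw [PySem.Int.mod_eq_emod_of_pos h2k, PySem.Int.mod_eq_emod_of_pos h2k]
  have hge : 0 ≤ i % (2 * k) := Int.emod_nonneg i (by omega)
  have hlt : i % (2 * k) < 2 * k := Int.emod_lt_of_pos i h2k
  obtain ⟨q, hq⟩ : ∃ q, i = 2 * k * q + i % (2 * k) :=
    ⟨i / (2 * k), by have := Int.mul_ediv_add_emod i (2 * k); omega⟩
  by_cases hc : i % (2 * k) = 2 * k - 1
  · simp only [hc]
    rw [show i + 1 = (q + 1) * (2 * k) by rw [add_mul, one_mul, mul_comm q (2 * k)]; omega, Int.mul_emod_left]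
    simp
  · simp only [if_neg hc]
    have : i + 1 = i % (2 * k) + 1 + 2 * k * q := by omega
    rw [this, Int.add_mul_emod_self_left, Int.emod_eq_of_lt (by omega) (by omega)]

-- A's fold, started at position i in the closed-form (bundle, direction) state, is the
-- position-driven fold stepT over the enumerated remainder
lemma loop_eq (k : Int) (hk : 1 ≤ k) (values : List Int) :
    ∀ (i : Int), 0 ≤ i → ∀ (parts : List (List Int)),
      (values.foldl (stepA k)
        (parts,
         (if PySem.Int.mod i (2 * k) < k then PySem.Int.mod i (2 * k)
          else 2 * k - 1 - PySem.Int.mod i (2 * k)),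
         (if PySem.Int.mod i (2 * k) < k then 1 else -1))).1
      = (PySem.List.enumerate values i).foldl (stepT k) parts := by
  induction values with
  | nil => intro i hi parts; simp [PySem.List.enumerate]
  | cons v vs ih =>
    intro i hi parts
    rw [PySem.List.enumerate_cons, List.foldl_cons, List.foldl_cons]
    have h2k : (0 : Int) < 2 * k := by omega
    have hge : 0 ≤ PySem.Int.mod i (2 * k) := PySem.Int.mod_nonneg _ h2k
    have hlt : PySem.Int.mod i (2 * k) < 2 * k := PySem.Int.mod_lt _ h2k
    have hstep : stepA k
        (parts,
         (if PySem.Int.mod i (2 * k) < k then PySem.Int.mod i (2 * k)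
          else 2 * k - 1 - PySem.Int.mod i (2 * k)),
         (if PySem.Int.mod i (2 * k) < k then 1 else -1)) v
        = (stepT k parts (i, v),
           (if PySem.Int.mod (i + 1) (2 * k) < k then PySem.Int.mod (i + 1) (2 * k)
            else 2 * k - 1 - PySem.Int.mod (i + 1) (2 * k)),
           (if PySem.Int.mod (i + 1) (2 * k) < k then 1 else -1)) := by
      rw [mod_succ_cycle k i hk]
      simp only [stepA, stepT, tri]
      refine Prod.ext rfl (Prod.ext ?_ ?_) <;>
        · simp only [apply_ite (Prod.fst (α := Int) (β := Int)),
            apply_ite (Prod.snd (α := Int) (β := Int))]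
          split_ifs <;> omega
    rw [hstep]
    exact ih (i + 1) (by omega) _

lemma tri_bounds (k i : Int) (hk : 1 ≤ k) : 0 ≤ tri k i ∧ tri k i < k := by
  have h2k : (0 : Int) < 2 * k := by omega
  have hge := PySem.Int.mod_nonneg i h2k
  have hlt := PySem.Int.mod_lt i h2k
  unfold tri; split_ifs <;> omega

-- indexing a parts list given as a map over range(k)
lemma pyGet?_map_range (k b : Int) (f : Int → List Int) (hb0 : 0 ≤ b) (hbk : b < k) :
    PySem.List.pyGet? ((PySem.List.pyRange 0 k 1).map f) b = some (f b) := by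
  rw [PySem.List.pyGet?_of_nonneg _ hb0, List.getElem?_map, PySem.List.getElem?_pyRange_one,
    if_pos (by omega)]
  simp [Int.toNat_of_nonneg hb0]

-- appending to bundle b of a parts list given as a map over range(k)
lemma appendAt_map_range (k b : Int) (f : Int → List Int) (v : Int)
    (hb0 : 0 ≤ b) (hbk : b < k) :
    pyAppendAt ((PySem.List.pyRange 0 k 1).map f) b v
      = (PySem.List.pyRange 0 k 1).map (fun j => if j = b then f j ++ [v] else f j) := by
  simp only [pyAppendAt, pyGet?_map_range k b f hb0 hbk]
  rw [PySem.List.pySetD_of_nonneg _ _ hb0]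
  apply List.ext_getElem
  · simp
  · intro m h1 h2
    rw [List.getElem_set]
    have hm : m < (PySem.List.pyRange 0 k 1).length := by
      simpa using h2
    rw [List.getElem_map, List.getElem_map, PySem.List.getElem_pyRange_one _ _ _ hm]
    by_cases h : b.toNat = m
    · rw [if_pos h, if_pos (by omega), show (0 + (m:Int)) = b from by omega]
    · rw [if_neg h, if_neg (by omega)]

-- the position-driven fold appends, bundle by bundle, exactly the selected sublists
lemma fold_stepT (k : Int) (hk : 1 ≤ k) :
    ∀ (vs : List Int) (i : Int) (f : Int → List Int),
      (PySem.List.enumerate vs i).foldl (stepT k) ((PySem.List.pyRange 0 k 1).map f)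
        = (PySem.List.pyRange 0 k 1).map (fun j => f j ++ selp k j i vs) := by
  intro vs
  induction vs with
  | nil =>
    intro i f
    simp [PySem.List.enumerate, selp]
  | cons v vs ih =>
    intro i f
    rw [PySem.List.enumerate_cons, List.foldl_cons]
    have hb := tri_bounds k i hk
    have hstep : stepT k ((PySem.List.pyRange 0 k 1).map f) (i, v)
        = (PySem.List.pyRange 0 k 1).map (fun j => if j = tri k i then f j ++ [v] else f j) := by
      exact appendAt_map_range k (tri k i) f v hb.1 hb.2
    rw [hstep, ih (i + 1)]
    apply List.map_congr_left
    intro j _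
    by_cases h : j = tri k i
    · rw [if_pos h]
      simp [selp, h, List.append_assoc]
    · rw [if_neg h]
      simp only [selp]
      rw [if_neg (fun hh => h hh.symm)]
      simp

-- the wrapped position moves by k when the position advances by k
lemma mod_add_k (k i : Int) (hk : 1 ≤ k) :
    PySem.Int.mod (i + k) (2 * k)
      = if PySem.Int.mod i (2 * k) < k then PySem.Int.mod i (2 * k) + k
        else PySem.Int.mod i (2 * k) - k := by
  have h2k : (0 : Int) < 2 * k := by omega
  rw [PySem.Int.mod_eq_emod_of_pos h2k, PySem.Int.mod_eq_emod_of_pos h2k]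
  have hge : 0 ≤ i % (2 * k) := Int.emod_nonneg i (by omega)
  have hlt : i % (2 * k) < 2 * k := Int.emod_lt_of_pos i h2k
  obtain ⟨q, hq⟩ : ∃ q, i = 2 * k * q + i % (2 * k) :=
    ⟨i / (2 * k), by have := Int.mul_ediv_add_emod i (2 * k); omega⟩
  by_cases hc : i % (2 * k) < k
  · rw [if_pos hc, show i + k = i % (2 * k) + k + 2 * k * q from by omega,
      Int.add_mul_emod_self_left, Int.emod_eq_of_lt (by omega) (by omega)]
  · rw [if_neg hc, show i + k = i % (2 * k) - k + 2 * k * (q + 1) from by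
        have hm : 2 * k * (q + 1) = 2 * k * q + 2 * k := by ring
        omega,
      Int.add_mul_emod_self_left, Int.emod_eq_of_lt (by omega) (by omega)]

-- the triangle wave flips when the position advances by k
lemma tri_flip (k i : Int) (hk : 1 ≤ k) : tri k (i + k) = k - 1 - tri k i := by
  have h2k : (0 : Int) < 2 * k := by omega
  have hge := PySem.Int.mod_nonneg i h2k
  have hlt := PySem.Int.mod_lt i h2k
  unfold tri
  rw [mod_add_k k i hk]
  split_ifs <;> omega

lemma selp_shift (k : Int) (hk : 1 ≤ k) :
    ∀ (vs : List Int) (j i : Int), selp k j (i + k) vs = selp k (k - 1 - j) i vs := by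
  intro vs
  induction vs with
  | nil => intro j i; simp [selp]
  | cons v vs ih =>
    intro j i
    simp only [selp]
    rw [tri_flip k i hk, show i + k + 1 = (i + 1) + k from by ring, ih]
    congr 1
    by_cases h : tri k i = k - 1 - j
    · rw [if_pos (by omega), if_pos h]
    · rw [if_neg (by omega), if_neg h]

lemma selp_append (k j : Int) :
    ∀ (xs ys : List Int) (i : Int), selp k j i (xs ++ ys) = selp k j i xs ++ selp k j (i + xs.length) ys := by
  intro xs
  induction xs with
  | nil => intro ys i; simp [selp]
  | cons x xs ih =>
    intro ys i
    simp only [List.cons_append, selp, ih, List.length_cons]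
    rw [List.append_assoc, show i + 1 + (xs.length : Int) = i + ((xs.length : Int) + 1) from by ring]
    push_cast
    rfl

-- on a chunk that fits before the first fold of the wave, selection is plain indexing
lemma selp_short (k : Int) (hk : 1 ≤ k) :
    ∀ (rs : List Int) (t j : Int), 0 ≤ t → t + rs.length ≤ k →
      selp k j t rs = if t ≤ j then (rs[(j - t).toNat]?).toList else [] := by
  intro rs
  induction rs with
  | nil =>
    intro t j _ _
    simp [selp]
  | cons v vs ih =>
    intro t j ht0 htk
    rw [List.length_cons] at htk
    push_cast at htk
    have h2k : (0 : Int) < 2 * k := by omega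
    have htri : tri k t = t := by
      unfold tri
      rw [PySem.Int.mod_eq_emod_of_pos h2k, Int.emod_eq_of_lt ht0 (by omega), if_pos (by omega)]
    simp only [selp, htri]
    rw [ih (t + 1) j (by omega) (by omega)]
    by_cases hje : t = j
    · subst hje
      rw [if_pos rfl, if_neg (show ¬ (t + 1 ≤ t) from by omega), if_pos le_rfl]
      simp
    · by_cases hjl : t ≤ j
      · have hlt : t < j := lt_of_le_of_ne hjl hje
        rw [if_neg hje, if_pos (show t + 1 ≤ j from by omega), if_pos hjl,
          show (j - t).toNat = (j - (t + 1)).toNat + 1 from by omega]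
        simp
      · rw [if_neg hje, if_neg (show ¬ (t + 1 ≤ j) from by omega), if_neg hjl]
        simp

-- B's recursive distribute computes, bundle by bundle, the selected sublists
lemma distributeB_eq (k : Int) (hk : 1 ≤ k) :
    ∀ (fuel : Nat) (vs : List Int), vs.length < fuel →
      distributeB k fuel vs = (PySem.List.pyRange 0 k 1).map (fun j => selp k j 0 vs) := by
  intro fuel
  induction fuel with
  | zero => intro vs h; exact absurd h (Nat.not_lt_zero _)
  | succ fuel ih =>
    intro vs h
    match vs with
    | [] => simp [distributeB, selp]
    | v :: l =>
      have hk0 : (0:Int) ≤ k := by omega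
      simp only [distributeB]
      rw [PySem.List.slice_to _ hk0, PySem.List.slice_from _ hk0]
      have hkn : 1 ≤ k.toNat := by omega
      have hrl : ((v :: l).drop k.toNat).length < fuel := by
        rw [List.length_drop]
        simp only [List.length_cons] at h ⊢
        omega
      rw [ih _ hrl]
      apply List.map_congr_left
      intro j hj
      rw [PySem.List.mem_pyRange_one] at hj
      rw [pyGet?_map_range k (k - 1 - j) _ (by omega) (by omega)]
      simp only [Option.getD_some]
      conv_rhs => rw [show v :: l = (v :: l).take k.toNat ++ (v :: l).drop k.toNat from (List.take_append_drop _ _).symm]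
      rw [selp_append]
      have hrowlen : (((v :: l).take k.toNat).length : Int) ≤ k := by
        rw [List.length_take]
        omega
      rw [selp_short k hk _ 0 j (le_refl 0) (by simpa using hrowlen), if_pos hj.1]
      congr 1
      · by_cases hjr : j < (((v :: l).take k.toNat).length : Int)
        · rw [if_pos hjr, PySem.List.pyGet?_of_nonneg _ hj.1,
            show j - 0 = j from by ring,
            List.getElem?_eq_getElem (by omega)]
          simp
        · rw [if_neg hjr, show j - 0 = j from by ring,
            List.getElem?_eq_none (by omega)]
          rfl
      · by_cases hfull : k.toNat ≤ (v :: l).length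
        · rw [show ((((v :: l).take k.toNat).length : Nat) : Int) = k from by
            rw [List.length_take]; omega]
          rw [selp_shift k hk _ j 0]
        · rw [List.drop_eq_nil_of_le (by omega)]
          simp [selp]

-- ===== VERDICT (by name: the statement is the Claim_ definition above) =====
theorem bidirectional_balanced_partition_spec : Claim_equal_bidirectional_balanced_partition := by
  intro k xs _ hpre
  unfold Spec_bidirectional_balanced_partition
  unfold bidirectional_balanced_partition bidirectional_balanced_partition_alt
  by_cases hk : 1 ≤ k
  · have h0 : PySem.Int.mod 0 (2 * k) = 0 := by
      rw [PySem.Int.mod_eq_emod_of_pos (by omega : (0:Int) < 2*k)]; simp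
    have hloop := loop_eq k hk (PySem.List.sorted xs (fun x => x) true) 0 (by omega)
      ((PySem.List.pyRange 0 k 1).map (fun _ => []))
    rw [h0] at hloop
    have hfold := fold_stepT k hk (PySem.List.sorted xs (fun x => x) true) 0 (fun _ => [])
    have hdist := distributeB_eq k hk ((PySem.List.sorted xs (fun x => x) true).length + 1)
      (PySem.List.sorted xs (fun x => x) true) (by omega)
    simp only [List.nil_append] at hfold
    rw [show ((if (0:Int) < k then (0:Int) else 2*k-1-0) = 0) from by simp [show (0:Int) < k from by omega]] at hloop
    rw [show ((if (0:Int) < k then (1:Int) else -1) = 1) from by simp [show (0:Int) < k from by omega]] at hloop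
    rw [hloop, hfold, hdist]
  · have hxs : xs = [] := hpre.resolve_left hk
    subst hxs
    simp [PySem.List.sorted, distributeB]
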